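-- pv_equiv track=rewrite | github.com/clk-project/clk | clk/flow.py | clean_flow_arguments
-- ===== SOURCE A (Python) =====
-- def clean_flow_arguments(arguments):
--     arguments = arguments[:]
--     while "--flow" in arguments:
--         del arguments[arguments.index("--flow")]
--     while "--flow-from" in arguments:
--         del arguments[arguments.index("--flow-from") + 1]
--         del arguments[arguments.index("--flow-from")]
--     to_remove = [i for i, arg in enumerate(arguments) if arg.startswith("--flow-from=")]
--     for i in reversed(to_remove):
--         del arguments[i]
--     while "--flow-after" in arguments:
--         del arguments[arguments.index("--flow-after") + 1]
--         del arguments[arguments.index("--flow-after")]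
--     to_remove = [
--         i for i, arg in enumerate(arguments) if arg.startswith("--flow-after=")
--     ]
--     for i in reversed(to_remove):
--         del arguments[i]
--     return arguments
-- ===== SOURCE B (Python) =====
-- def _drop_flag(args, flag):
--     # single left-to-right scan: drop each flag together with the argument after it
--     out = []
--     i = 0
--     n = len(args)
--     while i < n:
--         if args[i] == flag:
--             i += 2
--         else:
--             out.append(args[i])
--             i += 1
--     return out
--
--
-- def clean_flow_arguments(arguments):
--     args = [a for a in arguments if a != "--flow"]
--     args = _drop_flag(args, "--flow-from")
--     args = [a for a in args if not a.startswith("--flow-from=")]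
--     args = _drop_flag(args, "--flow-after")
--     args = [a for a in args if not a.startswith("--flow-after=")]
--     return args
-- ===== Notes on version B (the rewrite author's own statement) =====
-- stated objective: alternative
-- what changed: A repeatedly rescans and mutates the list (membership test + .index + del in while loops, and reversed index-list deletions); B is a pipeline of single passes: a filter removing --flow, one left-to-right scan per pair flag that drops the flag together with its following value, and a filter per --flow-from=/--flow-after= prefix.
-- outside the precondition, e.g. on clean_flow_arguments(['--flow-from', '--flow-after']): A returns [], B returns []; on clean_flow_arguments(['--flow-from']): A raises IndexError, B returns []
import Mathlib
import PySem

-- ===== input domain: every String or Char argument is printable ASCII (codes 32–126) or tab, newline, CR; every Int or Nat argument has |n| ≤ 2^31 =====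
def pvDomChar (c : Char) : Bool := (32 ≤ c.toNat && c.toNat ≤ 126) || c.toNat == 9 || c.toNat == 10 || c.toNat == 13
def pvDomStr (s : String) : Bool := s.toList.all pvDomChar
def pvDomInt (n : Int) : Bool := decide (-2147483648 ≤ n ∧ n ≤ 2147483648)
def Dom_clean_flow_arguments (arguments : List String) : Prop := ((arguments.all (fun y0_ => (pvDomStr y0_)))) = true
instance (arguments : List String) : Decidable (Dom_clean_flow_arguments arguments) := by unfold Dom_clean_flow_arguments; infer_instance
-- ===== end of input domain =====

-- B replaces A's repeated index-scan-and-delete loops by a pipeline of single passes: one filter /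
-- one pair-dropping scan per flag (objective: alternative). Where A raises IndexError (a pair flag
-- left without a following value), B returns instead (B drops the lone flag); those inputs are
-- excluded by Pre_.

-- ===== PORT A =====

-- `del l[l.index(flag)]` (the second del of each while-pair body; the guard ensures flag ∈ l,
-- the `none` branch is unreachable there)
def pvDelFirst (flag : String) (l : List String) : List String :=
  match PySem.List.index? l flag with
  | some j => l.eraseIdx j
  | none => l

theorem pvDelFirst_length_le (flag : String) (l : List String) :
    (pvDelFirst flag l).length ≤ l.length := by
  unfold pvDelFirst
  cases PySem.List.index? l flag with
  | none => exact le_refl _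
  | some j => exact List.length_eraseIdx_le l j

-- while "--flow" in arguments: del arguments[arguments.index("--flow")]
-- ("--flow" in arguments  ↔  index? ≠ none)
def pvWhileFlow (l : List String) : List String :=
  match h : PySem.List.index? l "--flow" with
  | none => l
  | some i => pvWhileFlow (l.eraseIdx i)
termination_by l.length
decreasing_by
  obtain ⟨hk, -, -⟩ := PySem.List.getElem_of_index?_eq_some h
  simp [List.length_eraseIdx, hk]
  omega

-- while flag in arguments: del arguments[arguments.index(flag) + 1]; del arguments[arguments.index(flag)]
-- If index(flag) + 1 == len(arguments), Python raises IndexError: that input is excluded by Pre_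
-- (the port returns l unchanged on that branch).
def pvWhilePair (flag : String) (l : List String) : List String :=
  match PySem.List.index? l flag with
  | none => l
  | some i =>
    if i + 1 < l.length then
      pvWhilePair flag (pvDelFirst flag (l.eraseIdx (i + 1)))
    else l
termination_by l.length
decreasing_by
  rename_i hi
  have h1 := pvDelFirst_length_le flag (l.eraseIdx (i + 1))
  have h2 : (l.eraseIdx (i + 1)).length = l.length - 1 := by
    simp [List.length_eraseIdx, hi]
  omega

-- to_remove = [i for i, arg in enumerate(arguments) if arg.startswith(pre)]
-- for i in reversed(to_remove): del arguments[i]      (enumerate indices are ≥ 0, so .toNat is exact)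
def pvDelPrefixed (pre : String) (l : List String) : List String :=
  let to_remove := ((PySem.List.enumerate l).filter
      (fun q => PySem.Str.startswith q.2 pre)).map (fun q => q.1.toNat)
  to_remove.reverse.foldl (fun acc i => acc.eraseIdx i) l

def clean_flow_arguments (arguments : List String) : List String :=
  let a0 := arguments        -- arguments = arguments[:]
  let a1 := pvWhileFlow a0
  let a2 := pvWhilePair "--flow-from" a1
  let a3 := pvDelPrefixed "--flow-from=" a2
  let a4 := pvWhilePair "--flow-after" a3
  pvDelPrefixed "--flow-after=" a4

-- ===== PORT B =====

-- _drop_flag: single scan, i += 2 on the flag (a trailing lone flag is simply dropped)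
def pvDropFlag (flag : String) : List String → List String
  | [] => []
  | a :: t =>
    if a = flag then
      match t with
      | [] => []
      | _ :: t' => pvDropFlag flag t'
    else a :: pvDropFlag flag t
termination_by l => l.length

def clean_flow_arguments_alt (arguments : List String) : List String :=
  let a1 := arguments.filter (fun a => a != "--flow")
  let a2 := pvDropFlag "--flow-from" a1
  let a3 := a2.filter (fun a => !(PySem.Str.startswith a "--flow-from="))
  let a4 := pvDropFlag "--flow-after" a3
  a4.filter (fun a => !(PySem.Str.startswith a "--flow-after="))

-- ===== PRECONDITION & SPEC =====

-- the list ends with an ODD number of consecutive occurrences of m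
def pvEndsOddRun (m : String) (l : List String) : Bool :=
  (l.reverse.takeWhile (fun a => a == m)).length % 2 == 1

-- the list ends with a "plain" element (neither pair flag, not --flow-from=…) that is not
-- preceded by "--flow-from" (so it can never be consumed as a flag value)
def pvPlainTail (l : List String) : Bool :=
  match l.reverse with
  | z :: rest => z != "--flow-from" && z != "--flow-after" &&
      !(PySem.Str.startswith z "--flow-from=") && rest.head? != some "--flow-from"
  | [] => false

-- Pre_ excludes exactly-and-a-little-more the inputs on which A raises IndexError (a "--flow-from"
-- or "--flow-after" left, when its while-loop reaches it, as the last element with no value to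
-- delete); the condition is conservative, so it also excludes some flag combinations on which A
-- returns — on every such input B returns the same list as A (see cites).
def Pre_clean_flow_arguments (arguments : List String) : Prop :=
  pvEndsOddRun "--flow-from" (arguments.filter (fun a => a != "--flow")) = false ∧
  ( "--flow-after" ∉ arguments.filter (fun a => a != "--flow") ∨
    ("--flow-from" ∉ arguments.filter (fun a => a != "--flow") ∧
      pvEndsOddRun "--flow-after"
        ((arguments.filter (fun a => a != "--flow")).filter
          (fun a => !(PySem.Str.startswith a "--flow-from="))) = false) ∨
    pvPlainTail (arguments.filter (fun a => a != "--flow")) = true )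

instance (arguments : List String) : Decidable (Pre_clean_flow_arguments arguments) := by
  unfold Pre_clean_flow_arguments; infer_instance

def pvWitness_clean_flow_arguments : List String :=
  ["--flow", "--flow-from", "x", "--flow-from=y", "--flow-after", "b", "--flow-after=c", "a"]

def Spec_clean_flow_arguments (arguments : List String) (out : List String) : Prop := out = clean_flow_arguments_alt arguments
instance (arguments : List String) (out : List String) : Decidable (Spec_clean_flow_arguments arguments out) := by unfold Spec_clean_flow_arguments; infer_instance

-- ===== CLAIM (what is proved, stated in full; the proofs are below) =====
def Claim_equal_clean_flow_arguments : Prop := ∀ (arguments : List String), Dom_clean_flow_arguments arguments → Pre_clean_flow_arguments arguments → Spec_clean_flow_arguments arguments (clean_flow_arguments arguments)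

-- ===== LEMMAS AND PROOFS =====

-- deleting at an offset past a prefix
theorem pvEraseIdx_append (p q : List String) (k : Nat) :
    (p ++ q).eraseIdx (p.length + k) = p ++ q.eraseIdx k := by
  induction p with
  | nil => simp
  | cons a t ih => simpa [Nat.succ_add] using ih

-- ---- pvWhileFlow = filter ----

theorem pvWhileFlow_eq_filter (l : List String) :
    pvWhileFlow l = l.filter (fun a => a != "--flow") := by
  induction l using pvWhileFlow.induct with
  | case1 l h =>
    rw [pvWhileFlow, h]
    rw [PySem.List.index?_eq_none_iff] at h
    refine (List.filter_eq_self.mpr (fun a ha => ?_)).symm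
    simp only [bne_iff_ne, ne_eq]
    exact fun e => h (e ▸ ha)
  | case2 l i h ih =>
    rw [pvWhileFlow, h]
    simp only []
    obtain ⟨p, suf, rfl, hlen, hnm⟩ := (PySem.List.index?_eq_some_iff _ _ _).mp h
    subst hlen
    have he : (p ++ "--flow" :: suf).eraseIdx p.length = p ++ suf := by
      simpa using pvEraseIdx_append p ("--flow" :: suf) 0
    rw [he] at ih ⊢
    rw [ih, List.filter_append, List.filter_append, List.filter_cons]
    simp

-- ---- pvDropFlag basics ----

theorem pvDropFlag_nil (flag : String) : pvDropFlag flag [] = [] := by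
  simp [pvDropFlag]

theorem pvDropFlag_cons_ne (flag a : String) (t : List String) (ha : a ≠ flag) :
    pvDropFlag flag (a :: t) = a :: pvDropFlag flag t := by
  cases t <;> simp [pvDropFlag, ha]

theorem pvDropFlag_flag_cons (flag b : String) (t : List String) :
    pvDropFlag flag (flag :: b :: t) = pvDropFlag flag t := by
  simp [pvDropFlag]

theorem pvDropFlag_flag_nil (flag : String) : pvDropFlag flag [flag] = [] := by
  simp [pvDropFlag]

theorem pvDropFlag_front (flag : String) (p q : List String) (hp : flag ∉ p) :
    pvDropFlag flag (p ++ q) = p ++ pvDropFlag flag q := by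
  induction p with
  | nil => rfl
  | cons a t ih =>
    simp only [List.mem_cons, not_or] at hp
    rw [List.cons_append, pvDropFlag_cons_ne flag a _ (fun e => hp.1 e.symm), ih hp.2,
      List.cons_append]

theorem pvDropFlag_not_mem (flag : String) (l : List String) (h : flag ∉ l) :
    pvDropFlag flag l = l := by
  simpa [pvDropFlag_nil] using pvDropFlag_front flag l [] h

theorem pvMem_dropFlag (flag a : String) (l : List String) (h : a ∈ pvDropFlag flag l) :
    a ∈ l := by
  induction l using pvDropFlag.induct flag with
  | case1 => simpa [pvDropFlag_nil] using h
  | case2 => simp [pvDropFlag_flag_nil] at h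
  | case3 b t ih =>
    rw [pvDropFlag_flag_cons] at h
    exact List.mem_cons_of_mem _ (List.mem_cons_of_mem _ (ih h))
  | case4 b t hb ih =>
    rw [pvDropFlag_cons_ne flag b t hb, List.mem_cons] at h
    rcases h with h | h
    · simp [h]
    · exact List.mem_cons_of_mem _ (ih h)

theorem pvDropFlag_split (flag y : String) (hy : y ≠ flag) (xs ys : List String) :
    pvDropFlag flag (xs ++ y :: ys) = pvDropFlag flag (xs ++ [y]) ++ pvDropFlag flag ys := by
  induction xs using pvDropFlag.induct flag with
  | case1 =>
    simp only [List.nil_append]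
    rw [pvDropFlag_cons_ne flag y ys hy, pvDropFlag_cons_ne flag y [] hy, pvDropFlag_nil]
    rfl
  | case2 =>
    simp only [List.singleton_append, List.cons_append, List.nil_append]
    rw [pvDropFlag_flag_cons, pvDropFlag_flag_cons, pvDropFlag_nil]
    rfl
  | case3 b t ih =>
    simp only [List.cons_append] at ih ⊢
    rw [pvDropFlag_flag_cons, pvDropFlag_flag_cons, ih]
  | case4 b t hb ih =>
    simp only [List.cons_append] at ih ⊢
    rw [pvDropFlag_cons_ne flag b _ hb, pvDropFlag_cons_ne flag b _ hb, ih, List.cons_append]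

-- ---- pvEndsOddRun facts ----

theorem pvTakeWhile_nil_of_all_false {α : Type} (p : α → Bool) (l : List α)
    (h : ∀ a ∈ l, p a = false) : l.takeWhile p = [] := by
  cases l with
  | nil => rfl
  | cons a t => simp [List.takeWhile_cons, h a (by simp)]

theorem pvTakeWhile_of_not_mem (m : String) (l : List String) (h : m ∉ l) :
    l.takeWhile (fun a => a == m) = [] := by
  refine pvTakeWhile_nil_of_all_false _ _ (fun a ha => ?_)
  simp only [beq_eq_false_iff_ne, ne_eq]
  exact fun e => h (e ▸ ha)

theorem pvTakeWhile_append_stop {α : Type} (p : α → Bool) (l w : List α) (x : α)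
    (hx : x ∈ l) (hpx : p x = false) : (l ++ w).takeWhile p = l.takeWhile p := by
  rw [List.takeWhile_append]
  split
  · rename_i hlen
    have heq : l.takeWhile p = l := List.IsPrefix.eq_of_length (List.takeWhile_prefix p) hlen
    have : p x = true := List.mem_takeWhile_imp (heq ▸ hx)
    simp [hpx] at this
  · rfl

theorem pvEndsOddRun_not_mem (m : String) (l : List String) (h : m ∉ l) :
    pvEndsOddRun m l = false := by
  unfold pvEndsOddRun
  rw [pvTakeWhile_of_not_mem m _ (by simpa using h)]
  rfl

theorem pvEndsOddRun_last_ne (m z : String) (hz : z ≠ m) (q : List String) :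
    pvEndsOddRun m (q ++ [z]) = false := by
  unfold pvEndsOddRun
  rw [List.reverse_append]
  simp [List.takeWhile_cons, hz]

theorem pvEndsOddRun_single (flag : String) (p : List String) (hp : flag ∉ p) :
    pvEndsOddRun flag (p ++ [flag]) = true := by
  unfold pvEndsOddRun
  rw [List.reverse_append]
  simp only [List.reverse_cons, List.reverse_nil, List.nil_append, List.singleton_append,
    List.takeWhile_cons, BEq.rfl]
  rw [pvTakeWhile_of_not_mem flag _ (by simpa using hp)]
  rfl

theorem pvEndsOddRun_preserve (flag v : String) (p suf : List String) (hp : flag ∉ p)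
    (h : pvEndsOddRun flag (p ++ flag :: v :: suf) = false) :
    pvEndsOddRun flag (p ++ suf) = false := by
  unfold pvEndsOddRun at h ⊢
  have htp : (p.reverse.takeWhile (fun a => a == flag)) = [] :=
    pvTakeWhile_of_not_mem flag _ (by simpa using hp)
  rw [List.reverse_append] at h ⊢
  simp only [List.reverse_cons, List.append_assoc, List.cons_append, List.singleton_append,
    List.nil_append] at h
  -- h : about suf.reverse ++ v :: flag :: p.reverse
  by_cases hall : ∀ x ∈ suf, x = flag
  · have hpos : ∀ a ∈ suf.reverse, (fun a => a == flag) a = true := by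
      intro a ha
      simpa using hall a (by simpa using ha)
    rw [List.takeWhile_append_of_pos hpos] at h ⊢
    rw [htp]
    by_cases hv : v = flag
    · have e1 : List.takeWhile (fun a => a == flag) (v :: flag :: p.reverse) =
          v :: flag :: [] := by
        simp [List.takeWhile_cons, hv, htp]
      rw [e1] at h
      simp only [List.length_append, List.length_cons, List.length_nil,
        beq_eq_false_iff_ne, ne_eq] at h ⊢
      omega
    · have e1 : List.takeWhile (fun a => a == flag) (v :: flag :: p.reverse) = [] := by
        simp [List.takeWhile_cons, hv]
      rw [e1] at h
      simpa using h
  · push_neg at hall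
    obtain ⟨x, hx, hxne⟩ := hall
    have hx' : x ∈ suf.reverse := by simpa using hx
    have hpx : (fun a => a == flag) x = false := by simpa using hxne
    rw [pvTakeWhile_append_stop _ _ _ x hx' hpx] at h ⊢
    exact h

-- ---- pvWhilePair = pvDropFlag when no raise ----

theorem pvWhilePair_aux (flag : String) : ∀ (n : Nat) (l : List String), l.length ≤ n →
    pvEndsOddRun flag l = false → pvWhilePair flag l = pvDropFlag flag l := by
  intro n
  induction n with
  | zero =>
    intro l hl _
    have hnil : l = [] := List.eq_nil_of_length_eq_zero (Nat.le_zero.mp hl)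
    subst hnil
    rw [pvWhilePair]
    have hidx : PySem.List.index? ([] : List String) flag = none :=
      (PySem.List.index?_eq_none_iff _ _).mpr (by simp)
    rw [hidx]
    simp [pvDropFlag_nil]
  | succ n ih =>
    intro l hl hodd
    cases hidx : PySem.List.index? l flag with
    | none =>
      rw [pvWhilePair, hidx]
      exact (pvDropFlag_not_mem flag l ((PySem.List.index?_eq_none_iff l flag).mp hidx)).symm
    | some i =>
      rw [pvWhilePair, hidx]
      simp only []
      obtain ⟨p, suf, rfl, hlen, hnm⟩ := (PySem.List.index?_eq_some_iff _ _ _).mp hidx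
      subst hlen
      cases suf with
      | nil =>
        have hs := pvEndsOddRun_single flag p hnm
        rw [hs] at hodd
        exact absurd hodd (by simp)
      | cons v rest =>
        have hi : p.length + 1 < (p ++ flag :: v :: rest).length := by
          simp [List.length_append]
        rw [if_pos hi]
        have he1 : (p ++ flag :: v :: rest).eraseIdx (p.length + 1) = p ++ flag :: rest := by
          simpa using pvEraseIdx_append p (flag :: v :: rest) 1
        rw [he1]
        have hidx2 : PySem.List.index? (p ++ flag :: rest) flag = some p.length :=
          (PySem.List.index?_eq_some_iff _ _ _).mpr ⟨p, rest, rfl, rfl, hnm⟩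
        have he2 : pvDelFirst flag (p ++ flag :: rest) = p ++ rest := by
          unfold pvDelFirst
          rw [hidx2]
          simpa using pvEraseIdx_append p (flag :: rest) 0
        rw [he2]
        have hodd' : pvEndsOddRun flag (p ++ rest) = false :=
          pvEndsOddRun_preserve flag v p rest hnm hodd
        have hlen' : (p ++ rest).length ≤ n := by
          simp only [List.length_append, List.length_cons] at hl ⊢
          omega
        rw [ih (p ++ rest) hlen' hodd', pvDropFlag_front flag p _ hnm,
          pvDropFlag_front flag p _ hnm, pvDropFlag_flag_cons]

theorem pvWhilePair_eq_dropFlag (flag : String) (l : List String)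
    (h : pvEndsOddRun flag l = false) :
    pvWhilePair flag l = pvDropFlag flag l :=
  pvWhilePair_aux flag l.length l le_rfl h

-- ---- pvDelPrefixed = filter ----

theorem pvIdxs_shift (pch : String → Bool) (t : List String) (s : Nat) :
    ((PySem.List.enumerate t (s : Int)).filter (fun q => pch q.2)).map (fun q => q.1.toNat) =
    (((PySem.List.enumerate t 0).filter (fun q => pch q.2)).map (fun q => q.1.toNat)).map
      (· + s) := by
  induction t generalizing s with
  | nil => simp [PySem.List.enumerate_nil]
  | cons x t ih =>
    rw [PySem.List.enumerate_cons, PySem.List.enumerate_cons]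
    have hcast : (s : Int) + 1 = ((s + 1 : Nat) : Int) := by push_cast; ring
    have hone : (0 : Int) + 1 = ((1 : Nat) : Int) := by norm_num
    have htail : ((PySem.List.enumerate t ((s : Int) + 1)).filter (fun q => pch q.2)).map
        (fun q => q.1.toNat) =
        ((((PySem.List.enumerate t 0).filter (fun q => pch q.2)).map (fun q => q.1.toNat)).map
          (· + 1)).map (· + s) := by
      rw [hcast, ih (s + 1)]
      simp only [List.map_map]
      refine List.map_congr_left (fun a _ => ?_)
      simp only [Function.comp_apply]
      omega
    have htail0 : ((PySem.List.enumerate t ((0 : Int) + 1)).filter (fun q => pch q.2)).map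
        (fun q => q.1.toNat) =
        (((PySem.List.enumerate t 0).filter (fun q => pch q.2)).map (fun q => q.1.toNat)).map
          (· + 1) := by
      rw [hone, ih 1]
    simp only [List.filter_cons]
    by_cases hx : pch x
    · rw [if_pos hx, if_pos hx, List.map_cons, List.map_cons, htail, htail0, List.map_cons]
      simp
    · rw [if_neg hx, if_neg hx, htail, htail0]

theorem pvFold_erase_shift (js : List Nat) : ∀ (t : List String) (x : String),
    List.foldl (fun acc i => acc.eraseIdx i) (x :: t) (js.map (· + 1)) =
    x :: List.foldl (fun acc i => acc.eraseIdx i) t js := by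
  induction js with
  | nil => intro t x; rfl
  | cons j js ih =>
    intro t x
    simp only [List.map_cons, List.foldl_cons, List.eraseIdx_cons_succ]
    exact ih _ _

theorem pvDelPrefixed_eq_filter (pre : String) (l : List String) :
    pvDelPrefixed pre l = l.filter (fun a => !(PySem.Str.startswith a pre)) := by
  induction l with
  | nil => simp [pvDelPrefixed, PySem.List.enumerate_nil]
  | cons x t ih =>
    simp only [pvDelPrefixed] at ih ⊢
    rw [PySem.List.enumerate_cons, List.filter_cons]
    have hone : (0 : Int) + 1 = ((1 : Nat) : Int) := by norm_num
    have hshift := pvIdxs_shift (fun a => PySem.Str.startswith a pre) t 1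
    by_cases hx : PySem.Str.startswith x pre
    · rw [if_pos (by simpa using hx), List.map_cons, hone, hshift]
      rw [List.reverse_cons, ← List.map_reverse, List.foldl_append, pvFold_erase_shift, ih]
      rw [List.filter_cons, if_neg (show ¬(!PySem.Str.startswith x pre) = true by
        rw [hx]; simp)]
      simp
    · have hx' : PySem.Str.startswith x pre = false := Bool.eq_false_iff.mpr hx
      rw [if_neg (by simpa using hx), hone, hshift]
      rw [← List.map_reverse, pvFold_erase_shift, ih, List.filter_cons,
        if_pos (show (!PySem.Str.startswith x pre) = true by rw [hx']; rfl)]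

-- ---- stage-4 safety ----

theorem pvStage4_safe (arguments : List String) (h : Pre_clean_flow_arguments arguments) :
    pvEndsOddRun "--flow-after"
      ((pvDropFlag "--flow-from" (arguments.filter (fun a => a != "--flow"))).filter
        (fun a => !(PySem.Str.startswith a "--flow-from="))) = false := by
  obtain ⟨-, hb⟩ := h
  rcases hb with hb | ⟨hb1, hb2⟩ | hb
  · refine pvEndsOddRun_not_mem _ _ (fun hmem => hb ?_)
    exact pvMem_dropFlag _ _ _ (List.mem_of_mem_filter hmem)
  · rw [pvDropFlag_not_mem _ _ hb1]
    exact hb2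
  · unfold pvPlainTail at hb
    cases hr : (arguments.filter (fun a => a != "--flow")).reverse with
    | nil => rw [hr] at hb; simp at hb
    | cons z rest =>
      rw [hr] at hb
      simp only [Bool.and_eq_true, bne_iff_ne, ne_eq, Bool.not_eq_true'] at hb
      obtain ⟨⟨⟨hz1, hz2⟩, hz3⟩, hz4⟩ := hb
      have hL : arguments.filter (fun a => a != "--flow") = rest.reverse ++ [z] := by
        rw [← List.reverse_reverse (arguments.filter (fun a => a != "--flow")), hr,
          List.reverse_cons]
      have hfz : List.filter (fun a => !(PySem.Str.startswith a "--flow-from=")) [z] = [z] := by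
        rw [List.filter_cons, if_pos (show (!PySem.Str.startswith z "--flow-from=") = true by
          rw [hz3]; rfl), List.filter_nil]
      cases rest with
      | nil =>
        have hz : arguments.filter (fun a => a != "--flow") = [z] := by simpa using hL
        rw [hz, pvDropFlag_cons_ne _ _ _ hz1, pvDropFlag_nil, hfz]
        simpa using pvEndsOddRun_last_ne "--flow-after" z hz2 []
      | cons y rest' =>
        have hy : y ≠ "--flow-from" := by
          intro e
          exact hz4 (by rw [List.head?_cons, e])
        have hL' : arguments.filter (fun a => a != "--flow") = rest'.reverse ++ y :: [z] := by
          rw [hL, List.reverse_cons, List.append_assoc]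
          rfl
        rw [hL', pvDropFlag_split _ _ hy, pvDropFlag_cons_ne _ _ _ hz1, pvDropFlag_nil,
          List.filter_append, hfz]
        exact pvEndsOddRun_last_ne _ _ hz2 _

-- ===== VERDICT (by name: the statement is the Claim_ definition above) =====
theorem clean_flow_arguments_spec : Claim_equal_clean_flow_arguments := by
  intro arguments _ hpre
  unfold Spec_clean_flow_arguments
  show clean_flow_arguments arguments = _
  simp only [clean_flow_arguments, clean_flow_arguments_alt]
  rw [pvWhileFlow_eq_filter, pvWhilePair_eq_dropFlag _ _ hpre.1, pvDelPrefixed_eq_filter,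
    pvDelPrefixed_eq_filter, pvWhilePair_eq_dropFlag _ _ (pvStage4_safe arguments hpre)]
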